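-- pv_equiv track=rewrite | github.com/GabrielSessions/TicTacThrow | js/pythonCode/isWin.py | inRow
-- ===== SOURCE A (Python) =====
-- def inRow(board, row, col, distance, color):
--     if distance == 0:
--         return True
--
--     if row < 0 or row > 3 or col < 0 or col > 3:
--         return False
--
--     if board[row][col] == color and inRow(board, row + 1, col, distance - 1, color):
--         return True
--     else:
--         return False
-- ===== SOURCE B (Python) =====
-- def inRow(board, row, col, distance, color):
--     if distance <= 0:
--         return distance == 0
--     if col < 0 or col > 3 or row < 0 or row + distance - 1 > 3:
--         return False
--     return all(board[r][col] == color for r in range(row, row + distance))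
-- ===== Notes on version B (the rewrite author's own statement) =====
-- stated objective: simpler
-- what changed: B replaces A's step-by-step recursion with a closed-form bounds test plus a single all() over range(row, row+distance), and handles non-positive distance arithmetically.
-- outside the precondition, e.g. on inRow([[0, 0, 0, 0]], 0, 0, 2, 1): A returns False, B returns False
import Mathlib
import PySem

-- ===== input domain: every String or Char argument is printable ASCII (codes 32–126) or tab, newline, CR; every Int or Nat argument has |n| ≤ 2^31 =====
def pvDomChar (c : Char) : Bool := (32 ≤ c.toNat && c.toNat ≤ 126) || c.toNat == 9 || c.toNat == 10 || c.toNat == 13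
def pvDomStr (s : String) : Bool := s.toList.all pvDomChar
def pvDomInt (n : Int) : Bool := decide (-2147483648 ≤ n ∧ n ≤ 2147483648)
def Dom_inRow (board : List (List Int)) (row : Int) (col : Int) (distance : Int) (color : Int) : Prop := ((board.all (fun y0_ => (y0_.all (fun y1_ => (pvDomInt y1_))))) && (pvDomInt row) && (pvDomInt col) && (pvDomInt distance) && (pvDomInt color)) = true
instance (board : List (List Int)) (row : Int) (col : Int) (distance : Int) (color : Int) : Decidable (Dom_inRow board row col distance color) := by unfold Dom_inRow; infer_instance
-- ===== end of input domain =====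

-- B replaces A's recursion by a closed-form bounds check plus one all() over the range of rows (same cost, simpler).

-- ===== PORT A =====
def inRow (board : List (List Int)) (row : Int) (col : Int) (distance : Int) (color : Int) : Bool :=
  if distance == 0 then true
  else if h : row < 0 || row > 3 || col < 0 || col > 3 then false
  else
    match (PySem.List.pyGet? board row).bind (fun rw => PySem.List.pyGet? rw col) with
    | none => false  -- Python raises IndexError here; such inputs are excluded by Pre_inRow
    | some v =>
        if v == color && inRow board (row + 1) col (distance - 1) color then true else false
termination_by (4 - row).toNat
decreasing_by
  simp only [Bool.or_eq_true, decide_eq_true_eq, not_or] at h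
  omega

-- ===== PORT B =====
def inRow_alt (board : List (List Int)) (row : Int) (col : Int) (distance : Int) (color : Int) : Bool :=
  if distance ≤ 0 then distance == 0
  else if col < 0 || col > 3 || row < 0 || row + distance - 1 > 3 then false
  else
    (PySem.List.pyRange row (row + distance) 1).all
      (fun r => ((PySem.List.pyGet? board r).bind (fun rw => PySem.List.pyGet? rw col)) == some color)

-- ===== PRECONDITION & SPEC =====
-- Pre_ excludes inputs on which Python A raises IndexError: a cell board[r][col] that the
-- downward walk may visit is missing. It is slightly narrower than A's exact raising set
-- (a colour mismatch can stop A before a missing later cell is reached): see the cite.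
def Pre_inRow (board : List (List Int)) (row : Int) (col : Int) (distance : Int) (color : Int) : Prop :=
  ∀ r ∈ ([0, 1, 2, 3] : List Int),
    (0 ≤ row ∧ row ≤ r ∧ 0 ≤ col ∧ col ≤ 3 ∧ (distance < 0 ∨ r < row + distance)) →
      ((PySem.List.pyGet? board r).bind (fun rw => PySem.List.pyGet? rw col)) ≠ none
instance (board : List (List Int)) (row : Int) (col : Int) (distance : Int) (color : Int) : Decidable (Pre_inRow board row col distance color) := by unfold Pre_inRow; infer_instance

def pvWitness_inRow : List (List Int) × Int × Int × Int × Int :=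
  ([[1, 1, 1, 1], [1, 1, 1, 1], [1, 1, 1, 1], [1, 1, 1, 1]], 0, 0, 4, 1)

def Spec_inRow (board : List (List Int)) (row : Int) (col : Int) (distance : Int) (color : Int) (out : Bool) : Prop := out = inRow_alt board row col distance color
instance (board : List (List Int)) (row : Int) (col : Int) (distance : Int) (color : Int) (out : Bool) : Decidable (Spec_inRow board row col distance color out) := by unfold Spec_inRow; infer_instance

-- ===== CLAIM (what is proved, stated in full; the proofs are below) =====
def Claim_equal_inRow : Prop := ∀ (board : List (List Int)) (row : Int) (col : Int) (distance : Int) (color : Int), Dom_inRow board row col distance color → Pre_inRow board row col distance color → Spec_inRow board row col distance color (inRow board row col distance color)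

-- ===== LEMMAS AND PROOFS =====

-- The two ports agree on every input (the Lean port of A returns false where Python A raises,
-- and B treats a missing cell as a mismatch, so the equality even holds unconditionally).

-- Unfolding step for B at an in-range cell that exists.
theorem alt_step (board : List (List Int)) (row col distance color v : Int)
    (hb : 0 ≤ row ∧ row ≤ 3 ∧ 0 ≤ col ∧ col ≤ 3) (hd : distance ≠ 0)
    (hm : (PySem.List.pyGet? board row).bind (fun rw => PySem.List.pyGet? rw col) = some v) :
    inRow_alt board row col distance color
      = (v == color && inRow_alt board (row + 1) col (distance - 1) color) := by
  obtain ⟨hr0, hr3, hc0, hc3⟩ := hb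
  by_cases h1 : distance ≤ 0
  · have hlt : distance < 0 := lt_of_le_of_ne h1 hd
    have e1 : (distance == 0) = false := by simp; omega
    have e2 : (distance - 1 == 0) = false := by simp; omega
    simp only [inRow_alt, if_pos h1, if_pos (show distance - 1 ≤ 0 by omega), e1, e2,
      Bool.and_false]
  · have hpos : 0 < distance := by omega
    by_cases h3 : row + distance - 1 > 3
    · have hlhs : (col < 0 || col > 3 || row < 0 || row + distance - 1 > 3) = true := by
        simp; omega
      have hdd : ¬ distance - 1 ≤ 0 := by omega
      have hrhs : (col < 0 || col > 3 || row + 1 < 0 || row + 1 + (distance - 1) - 1 > 3) = true := by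
        simp; omega
      simp only [inRow_alt, if_neg h1, if_pos hlhs, if_neg hdd, if_pos hrhs, Bool.and_false]
    · have hlhs : (col < 0 || col > 3 || row < 0 || row + distance - 1 > 3) = false := by
        simp; omega
      rw [inRow_alt]
      rw [if_neg h1, hlhs]
      simp only [Bool.false_eq_true, if_false]
      rw [PySem.List.pyRange_one_cons (show row < row + distance by omega), List.all_cons, hm]
      by_cases h4 : distance = 1
      · subst h4
        simp [inRow_alt, PySem.List.pyRange_one_eq_nil]
      · have hdd : ¬ distance - 1 ≤ 0 := by omega
        have hrhs : (col < 0 || col > 3 || row + 1 < 0 || row + 1 + (distance - 1) - 1 > 3) = false := by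
          simp; omega
        rw [inRow_alt]
        rw [if_neg hdd, hrhs]
        simp only [Bool.false_eq_true, if_false]
        have : row + 1 + (distance - 1) = row + distance := by ring
        rw [this]
        simp

theorem inRow_eq_alt (board : List (List Int)) (row col distance color : Int) :
    inRow board row col distance color = inRow_alt board row col distance color := by
  fun_induction inRow board row col distance color with
  | case1 row distance hd =>
    have : distance = 0 := by simpa using hd
    subst this
    simp [inRow_alt]
  | case2 row distance hd hb =>
    simp only [Bool.or_eq_true, decide_eq_true_eq] at hb
    have hne : distance ≠ 0 := by simpa using hd
    simp only [inRow_alt]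
    split_ifs with h1 h2
    · simp [hne]
    · rfl
    · exfalso
      simp only [Bool.or_eq_true, decide_eq_true_eq, not_or] at h2
      omega
  | case3 row distance hd hb hm =>
    simp only [Bool.or_eq_true, decide_eq_true_eq, not_or] at hb
    have hne : distance ≠ 0 := by simpa using hd
    simp only [inRow_alt]
    split_ifs with h1 h2
    · simp [hne]
    · rfl
    · simp only [Bool.or_eq_true, decide_eq_true_eq, not_or] at h2
      rw [PySem.List.pyRange_one_cons (show row < row + distance by omega), List.all_cons, hm]
      simp
  | case4 row distance hd hb v hm ih hc =>
    have hb' : 0 ≤ row ∧ row ≤ 3 ∧ 0 ≤ col ∧ col ≤ 3 := by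
      simp only [Bool.or_eq_true, decide_eq_true_eq, not_or] at hb; omega
    have hne : distance ≠ 0 := by simpa using hd
    rw [alt_step board row col distance color v hb' hne hm, ← hc]
    exact ih.symm
  | case5 row distance hd hb v hm ih hc =>
    have hb' : 0 ≤ row ∧ row ≤ 3 ∧ 0 ≤ col ∧ col ≤ 3 := by
      simp only [Bool.or_eq_true, decide_eq_true_eq, not_or] at hb; omega
    have hne : distance ≠ 0 := by simpa using hd
    rw [alt_step board row col distance color v hb' hne hm, ← hc]
    simp only [Bool.not_eq_true] at ih
    exact ih.symm

-- ===== VERDICT (by name: the statement is the Claim_ definition above) =====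
theorem inRow_spec : Claim_equal_inRow := by
  intro board row col distance color _ _
  show inRow board row col distance color = inRow_alt board row col distance color
  exact inRow_eq_alt board row col distance color
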